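-- pv_equiv track=rewrite | github.com/dyliu0312/hifigps | src/hifigps/scripts/find_fuzzy_par.py | get_fuzzy_indices
-- ===== SOURCE A (Python) =====
-- def get_fuzzy_indices(halo_npart:list, subhalo_npart:list):
--     """
--     Calculates the start and end indices of the fuzzy particles for each halo.
--
--     The particle data is assumed to be ordered sequentially:
--     ... [Subhalo 1 particles] [Subhalo 2 particles] ... [Fuzz particles] ...
--
--     Args:
--         halo_npart: A list containing the total number of particles for each halo.
--         subhalo_npart: A list containing the total number of particles within subhalos for each halo.
--
--     Returns:
--         A tuple: (start indices list, end indices list) of the fuzz particles for each halo.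
--     """
--     st_inds = [] # List for start indices of the fuzz component
--     ed_inds = [] # List for end indices of the fuzz component
--
--     temp_sum = 0 # Cumulative sum of particles processed so far (total particles in previous halos)
--
--     # st = temp_sum + j (subhalo particles) -> This is where the fuzz component *starts*
--     # ed = temp_sum + i (halo particles)    -> This is where the fuzz component *ends*
--     # (Since particles are assumed to be subhalos first, then fuzz)
--     for i,j in zip(halo_npart, subhalo_npart):
--         # The starting index of the fuzz component for the current halo.
--         # It's after all particles of all previous halos, plus all subhalo particles in the current halo.
--         st = temp_sum + j
--
--         # The ending index of the fuzz component (which is the end of the current halo's particles).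
--         ed = temp_sum + i
--
--         # Update the cumulative sum for the next halo
--         temp_sum = ed
--
--         st_inds.append(st)
--         ed_inds.append(ed)
--     return st_inds, ed_inds
-- ===== SOURCE B (Python) =====
-- def get_fuzzy_indices(halo_npart, subhalo_npart):
--     # Prefix-table decomposition: build the inclusive cumulative sums of
--     # halo_npart (the end indices) first, then derive each start index as
--     # end - halo_count + subhalo_count in a second pass.
--     n = min(len(halo_npart), len(subhalo_npart))
--     h = halo_npart[:n]
--     s = subhalo_npart[:n]
--     ed_inds = []
--     total = 0
--     for i in h:
--         total += i
--         ed_inds.append(total)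
--     st_inds = [e - i + j for e, i, j in zip(ed_inds, h, s)]
--     return st_inds, ed_inds
-- ===== Notes on version B (the rewrite author's own statement) =====
-- stated objective: alternative
-- what changed: Replaces the single loop that threads one running accumulator and emits both lists together with a two-phase decomposition: first a prefix-sum table of the truncated halo counts (the end indices), then a separate derivation pass computing each start index as end - halo_count + subhalo_count.
import Mathlib
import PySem

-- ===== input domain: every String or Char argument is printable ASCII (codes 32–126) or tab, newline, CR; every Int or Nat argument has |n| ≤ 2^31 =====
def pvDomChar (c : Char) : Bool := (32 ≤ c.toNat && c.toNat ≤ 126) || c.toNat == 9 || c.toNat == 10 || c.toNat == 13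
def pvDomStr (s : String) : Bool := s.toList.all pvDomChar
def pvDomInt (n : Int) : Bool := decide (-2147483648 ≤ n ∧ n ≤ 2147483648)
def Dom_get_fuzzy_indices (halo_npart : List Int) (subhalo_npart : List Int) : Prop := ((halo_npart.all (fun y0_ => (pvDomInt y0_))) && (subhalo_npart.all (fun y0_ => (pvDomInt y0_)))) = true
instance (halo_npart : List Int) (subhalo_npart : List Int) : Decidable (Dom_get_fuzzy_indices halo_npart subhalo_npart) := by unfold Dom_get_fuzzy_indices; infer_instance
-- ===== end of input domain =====

-- B replaces A's single accumulator loop by a prefix-sum table of end indices plus a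
-- separate derivation pass for the start indices (alternative decomposition, same cost).


-- ===== PORT A =====
-- A's loop over zip(halo_npart, subhalo_npart) with state (st_inds, ed_inds, temp_sum):
def get_fuzzy_indices (halo_npart : List Int) (subhalo_npart : List Int) : List Int × List Int :=
  let r := (halo_npart.zip subhalo_npart).foldl
    (fun acc p =>
      let st := acc.2.2 + p.2
      let ed := acc.2.2 + p.1
      (acc.1 ++ [st], acc.2.1 ++ [ed], ed))
    (([] : List Int), ([] : List Int), (0 : Int))
  (r.1, r.2.1)

-- ===== PORT B =====
-- Source B's first pass: running total, appending each inclusive cumulative sum.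
def pvCumsum (t : Int) : List Int → List Int
  | [] => []
  | x :: xs => (t + x) :: pvCumsum (t + x) xs

def get_fuzzy_indices_alt (halo_npart : List Int) (subhalo_npart : List Int) : List Int × List Int :=
  let n := min halo_npart.length subhalo_npart.length
  let h := halo_npart.take n   -- halo_npart[:n], n ≥ 0 so take is exact
  let s := subhalo_npart.take n
  let ed_inds := pvCumsum 0 h
  let st_inds := (ed_inds.zip (h.zip s)).map (fun p => p.1 - p.2.1 + p.2.2)
  (st_inds, ed_inds)

-- ===== PRECONDITION & SPEC =====
def Spec_get_fuzzy_indices (halo_npart : List Int) (subhalo_npart : List Int) (out : List Int × List Int) : Prop := out = get_fuzzy_indices_alt halo_npart subhalo_npart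
instance (halo_npart : List Int) (subhalo_npart : List Int) (out : List Int × List Int) : Decidable (Spec_get_fuzzy_indices halo_npart subhalo_npart out) := by unfold Spec_get_fuzzy_indices; infer_instance

-- ===== CLAIM (what is proved, stated in full; the proofs are below) =====
def Claim_equal_get_fuzzy_indices : Prop := ∀ (halo_npart : List Int) (subhalo_npart : List Int), Dom_get_fuzzy_indices halo_npart subhalo_npart → Spec_get_fuzzy_indices halo_npart subhalo_npart (get_fuzzy_indices halo_npart subhalo_npart)

-- ===== LEMMAS AND PROOFS =====

-- Reference recursion both ports are reduced to.
def pvFz (t : Int) : List (Int × Int) → List Int × List Int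
  | [] => ([], [])
  | p :: ps =>
    let r := pvFz (t + p.1) ps
    ((t + p.2) :: r.1, (t + p.1) :: r.2)

lemma foldA_eq (ps : List (Int × Int)) : ∀ (a b : List Int) (t : Int),
    ps.foldl (fun acc p =>
      let st := acc.2.2 + p.2
      let ed := acc.2.2 + p.1
      (acc.1 ++ [st], acc.2.1 ++ [ed], ed)) (a, b, t)
    = (a ++ (pvFz t ps).1, b ++ (pvFz t ps).2, t + (ps.map Prod.fst).sum) := by
  induction ps with
  | nil => simp [pvFz]
  | cons p ps ih =>
    intro a b t
    simp only [List.foldl_cons, pvFz, ih, List.map_cons, List.sum_cons]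
    simp [List.append_assoc]
    ring

lemma cumsum_eq (h : List Int) : ∀ (s : List Int) (t : Int), h.length = s.length →
    pvCumsum t h = (pvFz t (h.zip s)).2 := by
  induction h with
  | nil => intro s t _; simp [pvCumsum, pvFz]
  | cons i h ih =>
    intro s t hl
    cases s with
    | nil => simp at hl
    | cons j s =>
      simp only [List.length_cons] at hl
      simp [pvCumsum, pvFz, ih s (t + i) (by omega)]

lemma st_eq (h : List Int) : ∀ (s : List Int) (t : Int), h.length = s.length →
    ((pvCumsum t h).zip (h.zip s)).map (fun p => p.1 - p.2.1 + p.2.2)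
      = (pvFz t (h.zip s)).1 := by
  induction h with
  | nil => intro s t _; simp [pvCumsum, pvFz]
  | cons i h ih =>
    intro s t hl
    cases s with
    | nil => simp at hl
    | cons j s =>
      simp only [List.length_cons] at hl
      simp [pvCumsum, pvFz, ih s (t + i) (by omega)]

lemma zip_take_min (h s : List Int) :
    h.zip s = (h.take (min h.length s.length)).zip (s.take (min h.length s.length)) :=
  List.zip_eq_zip_take_min

-- ===== VERDICT (by name: the statement is the Claim_ definition above) =====
theorem get_fuzzy_indices_spec : Claim_equal_get_fuzzy_indices := by
  intro h s _
  show _ = _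
  simp only [get_fuzzy_indices, get_fuzzy_indices_alt]
  have hlen : (h.take (min h.length s.length)).length
      = (s.take (min h.length s.length)).length := by
    simp
  rw [zip_take_min h s, foldA_eq, st_eq _ _ 0 hlen, cumsum_eq _ _ 0 hlen]
  simp
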